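-- pv_equiv track=rewrite | github.com/GrandJune/DAOs | Christina2010/March1991.py | get_dominant_belief
-- ===== SOURCE A (Python) =====
-- def get_dominant_belief(xs):
--     """
--     For each domain, get the dominant element (-1, 0, 1)
--     :param xs: belief list, to count the dominant element
--     :return: the dominant element for each state position
--     """
--     dic = {cur: [0, 0, 0] for cur in range(len(xs[0]))}
--     for x in xs:
--         for cur in range(len(x)):
--             if x[cur] == -1:
--                 dic[cur][0] += 1
--             elif x[cur] == 0:
--                 dic[cur][1] += 1
--             else:
--                 dic[cur][2] += 1
--     res = []
--     for cur in range(len(xs[0])):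
--         index = dic[cur].index(max(dic[cur]))
--         if index == 0:
--             res.append(-1)
--         elif index == 1:
--             res.append(0)
--         else:
--             res.append(1)
--     return res
-- ===== SOURCE B (Python) =====
-- def get_dominant_belief(xs):
--     n = len(xs[0])
--     res = []
--     for j in range(n):
--         col = [x[j] for x in xs if j < len(x)]
--         counts = {-1: col.count(-1), 0: col.count(0)}
--         counts[1] = len(col) - counts[-1] - counts[0]
--         res.append(max((-1, 0, 1), key=counts.get))
--     return res
-- ===== Notes on version B (the rewrite author's own statement) =====
-- stated objective: idiomatic
-- what changed: Replaces the row-major pass that accumulates a per-column [neg,zero,other] count list in a dict (then argmax via list.index(max)) with a column-major pass: for each column take its values and pick max((-1,0,1), key=occurrence count), which reproduces the -1>0>1 tie-break.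
import Mathlib
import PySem

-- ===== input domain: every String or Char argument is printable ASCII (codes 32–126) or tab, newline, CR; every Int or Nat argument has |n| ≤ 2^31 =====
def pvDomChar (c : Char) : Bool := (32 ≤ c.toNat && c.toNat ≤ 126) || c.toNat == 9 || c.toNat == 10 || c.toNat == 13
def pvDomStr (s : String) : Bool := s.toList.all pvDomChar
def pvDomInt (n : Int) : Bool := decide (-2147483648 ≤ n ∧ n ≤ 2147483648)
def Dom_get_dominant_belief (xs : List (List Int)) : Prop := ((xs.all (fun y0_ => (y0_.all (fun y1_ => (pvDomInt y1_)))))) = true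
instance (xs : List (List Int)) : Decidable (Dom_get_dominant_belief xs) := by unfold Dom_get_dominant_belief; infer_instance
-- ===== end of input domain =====

-- B recomputes the same per-column dominant value column-by-column (count each column, take
-- max((-1,0,1)) keyed by count) instead of A's row-major dict of [neg,zero,other] count lists;
-- same cost, more idiomatic.

-- ===== PORT A =====
-- Python `dic[cur]` raises KeyError on a missing key; the total `getD`/`modify` surrogates are
-- exact under Pre_, which guarantees every accessed key 0..len(xs[0])-1 is present.
def get_dominant_belief (xs : List (List Int)) : List Int :=
  let n : Int := PySem.List.len (xs.headD [])  -- len(xs[0]); Pre_ requires xs ≠ []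
  let dic0 : PySem.Dict Int (List Int) :=
    (PySem.List.pyRange 0 n 1).foldl (fun d cur => d.insert cur [0, 0, 0]) PySem.Dict.empty
  let dic : PySem.Dict Int (List Int) :=
    xs.foldl (fun d x =>
      (PySem.List.pyRange 0 (PySem.List.len x) 1).foldl (fun d cur =>
        -- x[cur] is in range since cur ∈ range(len(x)); pyGetD is exact here
        if PySem.List.pyGetD x cur 0 = -1 then
          d.modify cur [] (fun l => l.set 0 (l.getD 0 0 + 1))
        else if PySem.List.pyGetD x cur 0 = 0 then
          d.modify cur [] (fun l => l.set 1 (l.getD 1 0 + 1))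
        else
          d.modify cur [] (fun l => l.set 2 (l.getD 2 0 + 1))) d) dic0
  (PySem.List.pyRange 0 n 1).foldl (fun res cur =>
    let lst := dic.getD cur []
    -- max(dic[cur]) on the nonempty 3-list, then .index of it; the .getD defaults never fire under Pre_
    let index := (PySem.List.index? lst ((PySem.List.max? lst (fun y => y)).getD 0)).getD 0
    if index = 0 then res ++ [-1]
    else if index = 1 then res ++ [0]
    else res ++ [1]) []

-- ===== PORT B =====
def get_dominant_belief_alt (xs : List (List Int)) : List Int :=
  let n : Int := PySem.List.len (xs.headD [])  -- len(xs[0]); raises on empty xs like A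
  (PySem.List.pyRange 0 n 1).foldl (fun res j =>
    let col := (xs.filter (fun x => decide (j < PySem.List.len x))).map
                 (fun x => PySem.List.pyGetD x j 0)
    let counts : PySem.Dict Int Int :=
      (PySem.Dict.empty.insert (-1) ((PySem.List.count col (-1) : Int))).insert 0 ((PySem.List.count col 0 : Int))
    let counts := counts.insert 1
      (PySem.List.len col - counts.getD (-1) 0 - counts.getD 0 0)
    res ++ [(PySem.List.max? [(-1 : Int), 0, 1] (fun v => counts.getD v 0)).getD 0]) []

-- ===== PRECONDITION & SPEC =====
-- Pre_ excludes exactly where A raises: empty xs (IndexError on xs[0]) and inputs with a row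
-- longer than xs[0] (KeyError: A's dict has keys only for the first row's columns).
def Pre_get_dominant_belief (xs : List (List Int)) : Prop :=
  xs ≠ [] ∧ ∀ x ∈ xs, x.length ≤ (xs.headD []).length
instance (xs : List (List Int)) : Decidable (Pre_get_dominant_belief xs) := by
  unfold Pre_get_dominant_belief; infer_instance
def pvWitness_get_dominant_belief : List (List Int) := [[1, 0, -1], [1, 1, 0], [0, 1, -1]]

def Spec_get_dominant_belief (xs : List (List Int)) (out : List Int) : Prop :=
  out = get_dominant_belief_alt xs
instance (xs : List (List Int)) (out : List Int) : Decidable (Spec_get_dominant_belief xs out) := by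
  unfold Spec_get_dominant_belief; infer_instance

-- ===== CLAIM (what is proved, stated in full; the proofs are below) =====
def Claim_equal_get_dominant_belief : Prop := ∀ (xs : List (List Int)),
  Dom_get_dominant_belief xs → Pre_get_dominant_belief xs →
    Spec_get_dominant_belief xs (get_dominant_belief xs)
-- ===== LEMMAS AND PROOFS =====

def pvUpd (l : List Int) (v : Int) : List Int :=
  if v = -1 then l.set 0 (l.getD 0 0 + 1)
  else if v = 0 then l.set 1 (l.getD 1 0 + 1)
  else l.set 2 (l.getD 2 0 + 1)

lemma pv_foldUpd (col : List Int) (a b c : Int) :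
    col.foldl pvUpd [a, b, c] =
      [a + (PySem.List.count col (-1) : Int), b + (PySem.List.count col 0 : Int),
       c + (PySem.List.len col - (PySem.List.count col (-1) : Int) - (PySem.List.count col 0 : Int))] := by
  induction col generalizing a b c with
  | nil => simp [PySem.List.count, PySem.List.len]
  | cons v t ih =>
    simp only [List.foldl_cons]
    by_cases h1 : v = -1
    · simp only [pvUpd, h1, if_pos rfl]
      simp [ih, PySem.List.count, PySem.List.len, List.count_cons]
      omega
    · by_cases h2 : v = 0
      · simp only [pvUpd, h2]
        simp [ih, PySem.List.count, PySem.List.len, List.count_cons]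
        omega
      · simp only [pvUpd, h1, h2, if_neg]
        simp [ih, PySem.List.count, PySem.List.len, List.count_cons, h1, h2]
        omega

lemma pv_dic0_getD (n j : Int) (hj : 0 ≤ j) (hjn : j < n) :
    (((PySem.List.pyRange 0 n 1).foldl (fun d cur => d.insert cur [0, 0, 0])
        (PySem.Dict.empty : PySem.Dict Int (List Int)))).getD j [] = [0, 0, 0] := by
  have key : ∀ (l : List Int) (d : PySem.Dict Int (List Int)) (j : Int),
      (l.foldl (fun d cur => d.insert cur [0, 0, 0]) d).getD j [] =
        if j ∈ l then [0, 0, 0] else d.getD j [] := by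
    intro l
    induction l with
    | nil => simp
    | cons k t ih =>
      intro d j
      simp only [List.foldl_cons, ih, List.mem_cons]
      by_cases hm : j ∈ t
      · simp [hm]
      · by_cases hk : j = k <;> simp [hm, hk, PySem.Dict.getD_insert]
  rw [key]
  simp [PySem.List.mem_pyRange_one, hj, hjn]

def pvRowStep (d : PySem.Dict Int (List Int)) (x : List Int) : PySem.Dict Int (List Int) :=
  (PySem.List.pyRange 0 (PySem.List.len x) 1).foldl (fun d cur =>
    if PySem.List.pyGetD x cur 0 = -1 then d.modify cur [] (fun l => l.set 0 (l.getD 0 0 + 1))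
    else if PySem.List.pyGetD x cur 0 = 0 then d.modify cur [] (fun l => l.set 1 (l.getD 1 0 + 1))
    else d.modify cur [] (fun l => l.set 2 (l.getD 2 0 + 1))) d

lemma pvRowStep_getD (x : List Int) (d : PySem.Dict Int (List Int)) (j : Int) (hj : 0 ≤ j) :
    (pvRowStep d x).getD j [] =
      if j < PySem.List.len x then pvUpd (d.getD j []) (PySem.List.pyGetD x j 0)
      else d.getD j [] := by
  induction x using List.reverseRecOn generalizing d with
  | nil =>
      have hnil : (pvRowStep d []).getD j [] = d.getD j [] := by
        simp [pvRowStep, PySem.List.len, PySem.List.pyRange_one_eq_nil]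
      rw [hnil, if_neg (by simp only [PySem.List.len_eq, List.length_nil, Nat.cast_zero]; omega)]
  | append_singleton t a ih =>
      have hlen : PySem.List.len (t ++ [a]) = (t.length : Int) + 1 := by
        simp [PySem.List.len]
      have hrange : PySem.List.pyRange 0 ((t.length : Int) + 1) 1
          = PySem.List.pyRange 0 (t.length : Int) 1 ++ [(t.length : Int)] := by
        exact PySem.List.pyRange_one_succ_right (by positivity)
      have hcongr : ∀ (d' : PySem.Dict Int (List Int)),
          (PySem.List.pyRange 0 (t.length : Int) 1).foldl (fun d cur =>
            if PySem.List.pyGetD (t ++ [a]) cur 0 = -1 then d.modify cur [] (fun l => l.set 0 (l.getD 0 0 + 1))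
            else if PySem.List.pyGetD (t ++ [a]) cur 0 = 0 then d.modify cur [] (fun l => l.set 1 (l.getD 1 0 + 1))
            else d.modify cur [] (fun l => l.set 2 (l.getD 2 0 + 1))) d' = pvRowStep d' t := by
        intro d'
        unfold pvRowStep
        simp only [PySem.List.len_eq]
        apply PySem.List.foldl_congr_mem
        intro acc cur hcur
        have hcur' := (PySem.List.mem_pyRange_one).mp hcur
        have hg : PySem.List.pyGetD (t ++ [a]) cur 0 = PySem.List.pyGetD t cur 0 := by
          rw [PySem.List.pyGetD_eq_getElem (t ++ [a]) 0 hcur'.1 (by simp; omega),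
              PySem.List.pyGetD_eq_getElem t 0 hcur'.1 (by omega)]
          exact List.getElem_append_left (by omega)
        rw [hg]
      have hlast : PySem.List.pyGetD (t ++ [a]) (t.length : Int) 0 = a := by simp
      rw [pvRowStep, hlen, hrange, List.foldl_append, hcongr]
      simp only [List.foldl_cons, List.foldl_nil, hlast]
      by_cases hja : j = (t.length : Int)
      · subst hja
        rw [if_pos (show ((t.length : Int)) < (t.length : Int) + 1 by omega), hlast]
        have hnot : ¬ ((t.length : Int) < PySem.List.len t) := by simp
        by_cases h1 : a = -1
        · rw [if_pos h1, PySem.Dict.getD_modify_self, ih d, if_neg hnot]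
          simp [pvUpd, h1]
        · by_cases h2 : a = 0
          · rw [if_neg h1, if_pos h2, PySem.Dict.getD_modify_self, ih d, if_neg hnot]
            simp [pvUpd, h1, h2]
          · rw [if_neg h1, if_neg h2, PySem.Dict.getD_modify_self, ih d, if_neg hnot]
            simp [pvUpd, h1, h2]
      · have hL : (if a = -1 then (pvRowStep d t).modify (t.length : Int) [] (fun l => l.set 0 (l.getD 0 0 + 1))
            else if a = 0 then (pvRowStep d t).modify (t.length : Int) [] (fun l => l.set 1 (l.getD 1 0 + 1))
            else (pvRowStep d t).modify (t.length : Int) [] (fun l => l.set 2 (l.getD 2 0 + 1))).getD j []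
            = (pvRowStep d t).getD j [] := by
          split_ifs <;> exact PySem.Dict.getD_modify_of_ne _ _ _ hja
        rw [hL, ih d]
        by_cases hjt : j < PySem.List.len t
        · have hjt'' : j < (t.length : Int) := by simpa using hjt
          rw [if_pos hjt, if_pos (show j < (t.length : Int) + 1 by omega)]
          congr 1
          rw [PySem.List.pyGetD_eq_getElem t 0 hj (by simpa using hjt),
              PySem.List.pyGetD_eq_getElem (t ++ [a]) 0 hj (by simp; omega)]
          exact (List.getElem_append_left (by omega)).symm
        · have hjt'' : ¬ j < (t.length : Int) := by simpa using hjt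
          rw [if_neg hjt, if_neg (show ¬ j < (t.length : Int) + 1 by omega)]

def pvCol (xs : List (List Int)) (j : Int) : List Int :=
  (xs.filter (fun x => decide (j < PySem.List.len x))).map (fun x => PySem.List.pyGetD x j 0)

lemma pv_outer_getD (xs : List (List Int)) (d : PySem.Dict Int (List Int)) (j : Int) (hj : 0 ≤ j) :
    (xs.foldl pvRowStep d).getD j [] = (pvCol xs j).foldl pvUpd (d.getD j []) := by
  induction xs generalizing d with
  | nil => simp [pvCol]
  | cons x t ih =>
    simp only [List.foldl_cons]
    rw [ih]
    by_cases hx : j < PySem.List.len x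
    · have hx' : j < (x.length : Int) := by simpa using hx
      have hc : pvCol (x :: t) j = PySem.List.pyGetD x j 0 :: pvCol t j := by
        simp [pvCol, List.filter_cons, hx']
      rw [hc]
      simp only [List.foldl_cons]
      congr 1
      rw [pvRowStep_getD x d j hj, if_pos hx]
    · have hx' : ¬ j < (x.length : Int) := by simpa using hx
      have hc : pvCol (x :: t) j = pvCol t j := by simp [pvCol, List.filter_cons, hx']
      rw [hc]
      congr 1
      rw [pvRowStep_getD x d j hj, if_neg hx]


lemma pv_cell (a b c : Int) :
    (let lst : List Int := [a, b, c]
     let index := (PySem.List.index? lst ((PySem.List.max? lst (fun y => y)).getD 0)).getD 0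
     if index = 0 then (-1 : Int) else if index = 1 then 0 else 1) =
    (PySem.List.max? [(-1 : Int), 0, 1]
      (fun v => ((((PySem.Dict.empty : PySem.Dict Int Int).insert (-1) a).insert 0 b).insert 1 c).getD v 0)).getD 0 := by
  by_cases hab : a < b
  · by_cases hbc : b < c
    · simp [PySem.List.max?, PySem.List.index?, List.idxOf?, List.findIdx?, List.findIdx?.go,
        PySem.Dict.getD, PySem.Dict.get?, PySem.Dict.insert, PySem.Dict.empty, hab, hbc, hbc.ne,
        (hab.trans hbc).ne]
    · simp [PySem.List.max?, PySem.List.index?, List.idxOf?, List.findIdx?, List.findIdx?.go,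
        PySem.Dict.getD, PySem.Dict.get?, PySem.Dict.insert, PySem.Dict.empty, hab, hbc, hab.ne]
  · by_cases hac : a < c
    · have hbc : b < c := lt_of_le_of_lt (not_lt.mp hab) hac
      simp [PySem.List.max?, PySem.List.index?, List.idxOf?, List.findIdx?, List.findIdx?.go,
        PySem.Dict.getD, PySem.Dict.get?, PySem.Dict.insert, PySem.Dict.empty, hab, hac, hac.ne,
        hbc.ne]
    · simp [PySem.List.max?, PySem.List.index?, List.idxOf?, List.findIdx?, List.findIdx?.go,
        PySem.Dict.getD, PySem.Dict.get?, PySem.Dict.insert, PySem.Dict.empty, hab, hac]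

def pvACell (D : PySem.Dict Int (List Int)) (cur : Int) : Int :=
  let lst := D.getD cur []
  let index := (PySem.List.index? lst ((PySem.List.max? lst (fun y => y)).getD 0)).getD 0
  if index = 0 then -1 else if index = 1 then 0 else 1

def pvBCell (xs : List (List Int)) (j : Int) : Int :=
  let col := (xs.filter (fun x => decide (j < PySem.List.len x))).map (fun x => PySem.List.pyGetD x j 0)
  let counts : PySem.Dict Int Int :=
    (PySem.Dict.empty.insert (-1) ((PySem.List.count col (-1) : Int))).insert 0 ((PySem.List.count col 0 : Int))
  let counts := counts.insert 1 (PySem.List.len col - counts.getD (-1) 0 - counts.getD 0 0)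
  (PySem.List.max? [(-1 : Int), 0, 1] (fun v => counts.getD v 0)).getD 0

lemma pv_foldA (n : Int) (D : PySem.Dict Int (List Int)) :
    (PySem.List.pyRange 0 n 1).foldl (fun res cur =>
      let lst := D.getD cur []
      let index := (PySem.List.index? lst ((PySem.List.max? lst (fun y => y)).getD 0)).getD 0
      if index = 0 then res ++ [-1] else if index = 1 then res ++ [0] else res ++ [1]) []
    = (PySem.List.pyRange 0 n 1).map (pvACell D) := by
  have h : (fun (res : List Int) (cur : Int) =>
      let lst := D.getD cur []
      let index := (PySem.List.index? lst ((PySem.List.max? lst (fun y => y)).getD 0)).getD 0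
      if index = 0 then res ++ [-1] else if index = 1 then res ++ [0] else res ++ [1])
      = (fun res cur => res ++ [pvACell D cur]) := by
    funext res cur
    simp only [pvACell]
    split_ifs <;> rfl
  rw [h, PySem.List.foldl_append_singleton_eq_map]
  simp

lemma pv_foldB (n : Int) (xs : List (List Int)) :
    (PySem.List.pyRange 0 n 1).foldl (fun res j =>
      let col := (xs.filter (fun x => decide (j < PySem.List.len x))).map (fun x => PySem.List.pyGetD x j 0)
      let counts : PySem.Dict Int Int :=
        (PySem.Dict.empty.insert (-1) ((PySem.List.count col (-1) : Int))).insert 0 ((PySem.List.count col 0 : Int))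
      let counts := counts.insert 1 (PySem.List.len col - counts.getD (-1) 0 - counts.getD 0 0)
      res ++ [(PySem.List.max? [(-1 : Int), 0, 1] (fun v => counts.getD v 0)).getD 0]) []
    = (PySem.List.pyRange 0 n 1).map (pvBCell xs) := by
  have h : (fun (res : List Int) (j : Int) =>
      let col := (xs.filter (fun x => decide (j < PySem.List.len x))).map (fun x => PySem.List.pyGetD x j 0)
      let counts : PySem.Dict Int Int :=
        (PySem.Dict.empty.insert (-1) ((PySem.List.count col (-1) : Int))).insert 0 ((PySem.List.count col 0 : Int))
      let counts := counts.insert 1 (PySem.List.len col - counts.getD (-1) 0 - counts.getD 0 0)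
      res ++ [(PySem.List.max? [(-1 : Int), 0, 1] (fun v => counts.getD v 0)).getD 0])
      = (fun res j => res ++ [pvBCell xs j]) := rfl
  rw [h, PySem.List.foldl_append_singleton_eq_map, List.nil_append]

lemma pvBCell_eq (xs : List (List Int)) (j : Int) :
    pvBCell xs j = (PySem.List.max? [(-1 : Int), 0, 1]
      (fun v => ((((PySem.Dict.empty : PySem.Dict Int Int).insert (-1)
          ((PySem.List.count (pvCol xs j) (-1) : Int))).insert 0
          ((PySem.List.count (pvCol xs j) 0 : Int))).insert 1
          (PySem.List.len (pvCol xs j) - (PySem.List.count (pvCol xs j) (-1) : Int)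
            - (PySem.List.count (pvCol xs j) 0 : Int))).getD v 0)).getD 0 := by
  simp only [pvBCell, pvCol, PySem.Dict.getD_insert]
  norm_num

lemma pv_main (xs : List (List Int)) : get_dominant_belief xs = get_dominant_belief_alt xs := by
  unfold get_dominant_belief get_dominant_belief_alt
  rw [show (fun (d : PySem.Dict Int (List Int)) (x : List Int) =>
      (PySem.List.pyRange 0 (PySem.List.len x) 1).foldl (fun d cur =>
        if PySem.List.pyGetD x cur 0 = -1 then d.modify cur [] (fun l => l.set 0 (l.getD 0 0 + 1))
        else if PySem.List.pyGetD x cur 0 = 0 then d.modify cur [] (fun l => l.set 1 (l.getD 1 0 + 1))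
        else d.modify cur [] (fun l => l.set 2 (l.getD 2 0 + 1))) d) = pvRowStep from rfl]
  simp only [pv_foldA, pv_foldB]
  apply List.map_congr_left
  intro cur hcur
  obtain ⟨h0, hN⟩ := PySem.List.mem_pyRange_one.mp hcur
  unfold pvACell
  rw [pv_outer_getD xs _ cur h0, pv_dic0_getD _ cur h0 hN, pv_foldUpd]
  simp only [zero_add]
  rw [pvBCell_eq]
  exact pv_cell _ _ _

-- ===== VERDICT (by name: the statement is the Claim_ definition above) =====
theorem get_dominant_belief_spec : Claim_equal_get_dominant_belief := by
  intro xs _ _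
  unfold Spec_get_dominant_belief
  exact pv_main xs
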